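-- pv_equiv track=rewrite | github.com/31b4/advent-of-code-2023 | day04/main.py | solve
-- ===== SOURCE A (Python) =====
-- from collections import defaultdict
--
-- def solve(data, p1, p2):
--     card_count = defaultdict(lambda: 1)
--     for i, (win, own) in enumerate(data):
--         win = set(list(map(int, win.split())))
--         own = set(list(map(int, own.split())))
--         card_number = i+1
--         same = len(win.intersection(own))
--
--         if len(win.intersection(own)) > 0:
--             p1 += 2 ** (same-1)
--             for e in range(card_number + 1, card_number + 1 + same):
--                 card_count[e] += card_count[card_number]
--         p2 += card_count[card_number]
--     return p1, p2
-- ===== SOURCE B (Python) =====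
-- def solve(data, p1, p2):
--     # pass 1: match counts per card, and part-1 score
--     matches = [len(set(map(int, w.split())) & set(map(int, o.split()))) for w, o in data]
--     p1 += sum(2 ** (m - 1) for m in matches if m > 0)
--     # pass 2: backward DP; f[0] = total cards produced by one copy of the current card
--     f = []
--     for m in reversed(matches):
--         f = [1 + sum(f[:m])] + f
--     return p1, p2 + sum(f)
-- ===== Notes on version B (the rewrite author's own statement) =====
-- stated objective: alternative
-- what changed: Replaces the forward defaultdict copy-propagation (inner range loop bumping future card counts) with a precomputed match-count list and a backward dynamic program f[i] = 1 + sum(f[i+1:i+1+m]) whose total sum is part 2.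
import Mathlib
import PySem

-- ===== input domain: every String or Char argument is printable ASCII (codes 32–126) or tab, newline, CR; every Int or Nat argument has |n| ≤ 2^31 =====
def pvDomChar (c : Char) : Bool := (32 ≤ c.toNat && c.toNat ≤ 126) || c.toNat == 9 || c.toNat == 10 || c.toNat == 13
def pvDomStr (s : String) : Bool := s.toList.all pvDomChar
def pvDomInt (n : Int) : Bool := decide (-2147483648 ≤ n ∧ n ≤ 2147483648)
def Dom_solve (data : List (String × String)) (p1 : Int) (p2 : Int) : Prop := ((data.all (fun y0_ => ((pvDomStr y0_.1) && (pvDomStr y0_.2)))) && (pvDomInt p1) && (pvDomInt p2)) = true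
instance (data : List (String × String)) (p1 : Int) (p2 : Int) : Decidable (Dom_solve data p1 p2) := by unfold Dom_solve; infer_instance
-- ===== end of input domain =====

-- B replaces A's forward defaultdict copy-propagation with a precomputed match-count
-- list and a backward DP (alternative decomposition, same asymptotic cost).


-- ===== PORT A =====
-- len(set(map(int, win.split())) ∩ set(map(int, own.split()))); tokens all parse under Pre_
-- (ofStr?.getD 0 is exact there; Python raises ValueError outside Pre_).
def sameCount (win own : String) : Int :=
  let w : PySem.Set Int := PySem.Set.ofList ((PySem.Str.split₀ win).map (fun t => (PySem.Int.ofStr? t).getD 0))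
  let o : PySem.Set Int := PySem.Set.ofList ((PySem.Str.split₀ own).map (fun t => (PySem.Int.ofStr? t).getD 0))
  PySem.Set.len (PySem.Set.inter w o)

-- one iteration of A's loop body (state: card_count dict, p1, p2; ie = (i, (win, own)))
def stepA (st : PySem.Dict Int Int × Int × Int) (ie : Int × (String × String)) :
    PySem.Dict Int Int × Int × Int :=
  let d := st.1
  let cardNumber := ie.1 + 1
  let same := sameCount ie.2.1 ie.2.2
  if same > 0 then
    let p1' := st.2.1 + 2 ^ (same - 1).toNat
    let d' := (PySem.List.pyRange (cardNumber + 1) (cardNumber + 1 + same) 1).foldl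
      (fun d e => d.modify e 1 (fun v => v + d.getD cardNumber 1)) d
    (d', p1', st.2.2 + d'.getD cardNumber 1)
  else
    (d, st.2.1, st.2.2 + d.getD cardNumber 1)

def solve (data : List (String × String)) (p1 : Int) (p2 : Int) : Int × Int :=
  let st := (PySem.List.enumerate data 0).foldl stepA (PySem.Dict.empty, p1, p2)
  (st.2.1, st.2.2)

-- ===== PORT B =====
-- the backward loop 'for m in reversed(matches): f = [1 + sum(f[:m])] + f' (m ≥ 0, so f[:m] = take m)
def flistB (ms : List Int) : List Int :=
  ms.foldr (fun m fs => (1 + (fs.take m.toNat).sum) :: fs) []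

def solve_alt (data : List (String × String)) (p1 : Int) (p2 : Int) : Int × Int :=
  let mts := data.map (fun wo => sameCount wo.1 wo.2)
  let p1' := p1 + ((mts.filter (fun m => m > 0)).map (fun m => (2:Int) ^ (m - 1).toNat)).sum
  (p1', p2 + (flistB mts).sum)

-- ===== PRECONDITION & SPEC =====
-- Pre_ excludes exactly the inputs where int() raises ValueError on some token of a card.
def Pre_solve (data : List (String × String)) (p1 : Int) (p2 : Int) : Prop :=
  (data.all (fun wo => (PySem.Str.split₀ wo.1 ++ PySem.Str.split₀ wo.2).all
      (fun t => (PySem.Int.ofStr? t).isSome))) = true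
instance (data : List (String × String)) (p1 : Int) (p2 : Int) : Decidable (Pre_solve data p1 p2) := by unfold Pre_solve; infer_instance
def pvWitness_solve : (List (String × String)) × Int × Int := ([("1 2", " 2  3"), ("5", "7")], 0, 0)

def Spec_solve (data : List (String × String)) (p1 : Int) (p2 : Int) (out : Int × Int) : Prop := out = solve_alt data p1 p2
instance (data : List (String × String)) (p1 : Int) (p2 : Int) (out : Int × Int) : Decidable (Spec_solve data p1 p2 out) := by unfold Spec_solve; infer_instance

-- ===== CLAIM (what is proved, stated in full; the proofs are below) =====
def Claim_equal_solve : Prop := ∀ (data : List (String × String)) (p1 : Int) (p2 : Int), Dom_solve data p1 p2 → Pre_solve data p1 p2 → Spec_solve data p1 p2 (solve data p1 p2)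

-- ===== LEMMAS AND PROOFS =====

-- counts of remaining cards as A's dict sees them: card i+1+k has count d[i+1+k] (default 1)
def extract (d : PySem.Dict Int Int) (i : Int) (n : Nat) : List Int :=
  (List.range n).map (fun k : Nat => d.getD (i + 1 + (k : Int)) 1)

-- add c to the first m entries of cs (A's copy propagation, capped at the window end)
def bump (m c : Int) (cs : List Int) : List Int :=
  (cs.take m.toNat).map (· + c) ++ cs.drop m.toNat

-- total A's loop adds to p2, as a recurrence on match counts / current counts
def Atotal : List Int → List Int → Int
  | [], _ => 0
  | _ :: _, [] => 0
  | m :: ms, c :: cs => c + Atotal ms (bump m c cs)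

def msOf (data : List (String × String)) : List Int :=
  data.map (fun wo => sameCount wo.1 wo.2)

def powsum (ms : List Int) : Int :=
  (ms.map (fun m => if m > 0 then (2:Int) ^ (m - 1).toNat else 0)).sum

def zipmul (cs g : List Int) : Int := (List.zipWith (· * ·) cs g).sum

lemma inner_getD (b : Int) : ∀ (a : Int) (d : PySem.Dict Int Int) (cn : Int), cn < a → ∀ k,
    ((PySem.List.pyRange a b 1).foldl (fun d e => d.modify e 1 (fun v => v + d.getD cn 1)) d).getD k 1
      = d.getD k 1 + (if a ≤ k ∧ k < b then d.getD cn 1 else 0) := by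
  have main : ∀ (n : Nat) (a : Int), (b - a).toNat = n → ∀ (d : PySem.Dict Int Int) (cn : Int),
      cn < a → ∀ k,
      ((PySem.List.pyRange a b 1).foldl (fun d e => d.modify e 1 (fun v => v + d.getD cn 1)) d).getD k 1
        = d.getD k 1 + (if a ≤ k ∧ k < b then d.getD cn 1 else 0) := by
    intro n
    induction n with
    | zero =>
      intro a hn d cn hcn k
      rw [PySem.List.pyRange_one_eq_nil (by omega)]
      simp only [List.foldl_nil]
      rw [if_neg (by omega)]
      ring
    | succ n ih =>
      intro a hn d cn hcn k
      have hab : a < b := by omega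
      rw [PySem.List.pyRange_one_cons hab]
      simp only [List.foldl_cons]
      rw [ih (a + 1) (by omega) _ cn (by omega) k]
      have e1 : (d.modify a 1 (fun v => v + d.getD cn 1)).getD k 1
          = if k = a then d.getD a 1 + d.getD cn 1 else d.getD k 1 := by
        rw [PySem.Dict.getD_modify]
      have e2 : (d.modify a 1 (fun v => v + d.getD cn 1)).getD cn 1 = d.getD cn 1 := by
        rw [PySem.Dict.getD_modify, if_neg (by omega)]
      rw [e1, e2]
      by_cases hk : k = a
      · subst hk
        rw [if_pos rfl]
        split_ifs <;> first | omega | ring1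
      · rw [if_neg hk]
        split_ifs <;> first | omega | ring1
  intro a d cn hcn k
  exact main ((b - a).toNat) a rfl d cn hcn k

lemma length_bump (m c : Int) (cs : List Int) : (bump m c cs).length = cs.length := by
  simp [bump]; omega

lemma getElem_bump (m c : Int) (cs : List Int) (k : Nat) (hk : k < cs.length)
    (hk' : k < (bump m c cs).length) :
    (bump m c cs)[k] = if k < m.toNat then cs[k] + c else cs[k] := by
  unfold bump
  by_cases h : k < m.toNat
  · rw [List.getElem_append_left (by simp; omega)]
    simp [List.getElem_take, h]
  · rw [List.getElem_append_right (by simp; omega)]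
    simp only [List.getElem_drop, List.length_map, List.length_take]
    rw [if_neg h]
    congr 1
    omega

lemma extract_cons (d : PySem.Dict Int Int) (i : Int) (n : Nat) :
    extract d i (n + 1) = d.getD (i + 1) 1 :: extract d (i + 1) n := by
  apply List.ext_getElem
  · simp [extract]
  · intro k hk hk'
    cases k with
    | zero => simp [extract]
    | succ k =>
      simp only [extract, List.getElem_map, List.getElem_range, List.getElem_cons_succ]
      congr 1
      push_cast
      ring

lemma extract_empty (i : Int) (n : Nat) :
    extract PySem.Dict.empty i n = List.replicate n 1 := by
  simp [extract, PySem.Dict.getD, PySem.Dict.get?, PySem.Dict.empty]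

lemma length_extract (d : PySem.Dict Int Int) (i : Int) (n : Nat) :
    (extract d i n).length = n := by simp [extract]

lemma extract_after (d : PySem.Dict Int Int) (i s : Int) (n : Nat) :
    extract ((PySem.List.pyRange (i + 1 + 1) (i + 1 + 1 + s) 1).foldl
        (fun d e => d.modify e 1 (fun v => v + d.getD (i + 1) 1)) d) (i + 1) n
      = bump s (d.getD (i + 1) 1) (extract d (i + 1) n) := by
  apply List.ext_getElem
  · rw [length_extract, length_bump, length_extract]
  · intro k hk hk'
    have hk2 : k < n := by rw [length_extract] at hk; exact hk
    rw [getElem_bump _ _ _ _ (by rw [length_extract]; exact hk2)]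
    simp only [extract, List.getElem_map, List.getElem_range]
    rw [inner_getD _ _ _ _ (by omega)]
    split_ifs <;> first | omega | ring1

lemma bump_of_nonpos (m c : Int) (cs : List Int) (h : ¬ m > 0) : bump m c cs = cs := by
  have : m.toNat = 0 := by omega
  simp [bump, this]

lemma loopA (rest : List (String × String)) : ∀ (i : Int) (d : PySem.Dict Int Int) (p1 p2 : Int),
    ((PySem.List.enumerate rest i).foldl stepA (d, p1, p2)).2.1 = p1 + powsum (msOf rest) ∧
    ((PySem.List.enumerate rest i).foldl stepA (d, p1, p2)).2.2
      = p2 + Atotal (msOf rest) (extract d i rest.length) := by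
  induction rest with
  | nil =>
    intro i d p1 p2
    simp [PySem.List.enumerate, msOf, powsum, Atotal]
  | cons x rest ih =>
    intro i d p1 p2
    rw [PySem.List.enumerate_cons]
    simp only [List.foldl_cons]
    have hms : msOf (x :: rest) = sameCount x.1 x.2 :: msOf rest := rfl
    have hpow : powsum (msOf (x :: rest))
        = (if sameCount x.1 x.2 > 0 then (2:Int) ^ (sameCount x.1 x.2 - 1).toNat else 0)
          + powsum (msOf rest) := by
      rw [hms]; simp [powsum]
    have hlen : (x :: rest).length = rest.length + 1 := rfl
    have hAt : Atotal (msOf (x :: rest)) (extract d i (x :: rest).length)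
        = d.getD (i + 1) 1
          + Atotal (msOf rest) (bump (sameCount x.1 x.2) (d.getD (i + 1) 1) (extract d (i + 1) rest.length)) := by
      rw [hms, hlen, extract_cons]
      rfl
    by_cases hs : sameCount x.1 x.2 > 0
    · have hstep : stepA (d, p1, p2) (i, x)
          = ((PySem.List.pyRange (i + 1 + 1) (i + 1 + 1 + sameCount x.1 x.2) 1).foldl
               (fun d e => d.modify e 1 (fun v => v + d.getD (i + 1) 1)) d,
             p1 + 2 ^ (sameCount x.1 x.2 - 1).toNat,
             p2 + ((PySem.List.pyRange (i + 1 + 1) (i + 1 + 1 + sameCount x.1 x.2) 1).foldl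
               (fun d e => d.modify e 1 (fun v => v + d.getD (i + 1) 1)) d).getD (i + 1) 1) := by
        simp only [stepA, if_pos hs]
      rw [hstep]
      set d' := (PySem.List.pyRange (i + 1 + 1) (i + 1 + 1 + sameCount x.1 x.2) 1).foldl
        (fun d e => d.modify e 1 (fun v => v + d.getD (i + 1) 1)) d with hd'
      have hc : d'.getD (i + 1) 1 = d.getD (i + 1) 1 := by
        rw [hd', inner_getD _ _ _ _ (by omega), if_neg (by omega)]
        ring
      obtain ⟨ih1, ih2⟩ := ih (i + 1) d' (p1 + 2 ^ (sameCount x.1 x.2 - 1).toNat)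
        (p2 + d'.getD (i + 1) 1)
      constructor
      · rw [ih1, hpow, if_pos hs]; ring
      · rw [ih2, hc, hAt, hd', extract_after]; ring
    · have hstep : stepA (d, p1, p2) (i, x) = (d, p1, p2 + d.getD (i + 1) 1) := by
        simp only [stepA, if_neg hs]
      rw [hstep]
      obtain ⟨ih1, ih2⟩ := ih (i + 1) d p1 (p2 + d.getD (i + 1) 1)
      constructor
      · rw [ih1, hpow, if_neg hs]; ring
      · rw [ih2, hAt, bump_of_nonpos _ _ _ hs]; ring

lemma length_flistB (ms : List Int) : (flistB ms).length = ms.length := by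
  induction ms with
  | nil => rfl
  | cons m ms ih => simp [flistB] at ih ⊢; omega

lemma zip_bumpN (cs : List Int) : ∀ (g : List Int) (t : Nat) (c : Int), cs.length = g.length →
    zipmul ((cs.take t).map (· + c) ++ cs.drop t) g = zipmul cs g + c * (g.take t).sum := by
  induction cs with
  | nil =>
    intro g t c h
    have : g = [] := by cases g <;> simp_all
    subst this
    simp [zipmul]
  | cons c' cs' ih =>
    intro g t c h
    cases g with
    | nil => simp at h
    | cons gh gt =>
      cases t with
      | zero => simp [zipmul]
      | succ t =>
        simp only [List.take_succ_cons, List.drop_succ_cons, List.map_cons, List.cons_append,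
          zipmul, List.zipWith_cons_cons, List.sum_cons, List.take_succ_cons] at *
        rw [ih gt t c (by simpa using h)]
        ring

lemma zip_bump (cs : List Int) (g : List Int) (m c : Int) (h : cs.length = g.length) :
    zipmul (bump m c cs) g = zipmul cs g + c * (g.take m.toNat).sum := by
  unfold bump
  exact zip_bumpN cs g m.toNat c h

lemma flistB_cons (m : Int) (ms : List Int) :
    flistB (m :: ms) = (1 + ((flistB ms).take m.toNat).sum) :: flistB ms := rfl

lemma Atotal_eq_zip (ms : List Int) : ∀ (cs : List Int), cs.length = ms.length →
    Atotal ms cs = zipmul cs (flistB ms) := by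
  induction ms with
  | nil =>
    intro cs h
    have : cs = [] := by cases cs <;> simp_all
    subst this
    simp [Atotal, zipmul, flistB]
  | cons m ms ih =>
    intro cs h
    cases cs with
    | nil => simp at h
    | cons c cs' =>
      have hlen : cs'.length = ms.length := by simpa using h
      rw [show Atotal (m :: ms) (c :: cs') = c + Atotal ms (bump m c cs') from rfl,
        ih (bump m c cs') (by rw [length_bump]; exact hlen),
        zip_bump _ _ _ _ (by rw [hlen, length_flistB]),
        flistB_cons]
      simp only [zipmul, List.zipWith_cons_cons, List.sum_cons]
      ring

lemma zip_replicate_one (g : List Int) : ∀ (n : Nat), g.length = n →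
    zipmul (List.replicate n 1) g = g.sum := by
  induction g with
  | nil => intro n _; simp [zipmul]
  | cons x g ih =>
    intro n hn
    cases n with
    | zero => simp at hn
    | succ n =>
      simp only [List.replicate_succ, zipmul, List.zipWith_cons_cons, List.sum_cons, one_mul,
        List.sum_cons] at *
      rw [ih n (by simpa using hn)]

lemma powsum_eq_filter (ms : List Int) :
    powsum ms = ((ms.filter (fun m => m > 0)).map (fun m => (2:Int) ^ (m - 1).toNat)).sum := by
  induction ms with
  | nil => rfl
  | cons m ms ih =>
    simp only [powsum] at ih ⊢
    by_cases h : m > 0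
    · rw [List.map_cons, List.sum_cons, List.filter_cons_of_pos (by simpa using h),
        List.map_cons, List.sum_cons, if_pos h, ih]
    · rw [List.map_cons, List.sum_cons, List.filter_cons_of_neg (by simpa using h),
        if_neg h, ih, zero_add]

-- ===== VERDICT (by name: the statement is the Claim_ definition above) =====
theorem solve_spec : Claim_equal_solve := by
  intro data p1 p2 _ _
  unfold Spec_solve
  have h := loopA data 0 PySem.Dict.empty p1 p2
  have e1 : solve data p1 p2
      = (((PySem.List.enumerate data 0).foldl stepA (PySem.Dict.empty, p1, p2)).2.1,
         ((PySem.List.enumerate data 0).foldl stepA (PySem.Dict.empty, p1, p2)).2.2) := rfl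
  rw [e1, h.1, h.2, extract_empty, Atotal_eq_zip _ _ (by simp [msOf]),
      zip_replicate_one _ _ (by simp [length_flistB, msOf]), powsum_eq_filter]
  rfl
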